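-- pv_equiv track=rewrite | github.com/dleemiller/CnakeCharmer | data/grpo_problems/string_matching_count.py | string_matching_count
-- ===== SOURCE A (Python) =====
-- def string_matching_count(text_len, pattern_len):
--     """Count character matches between a deterministic text and pattern using brute force.
--
--     Generates a text and pattern from a repeating alphabet, then counts
--     how many positions have at least one character match in a sliding window.
--
--     Returns (match_count, total_comparisons).
--     """
--     alpha = "abcdefghijklmnop"
--     text = ""
--     for i in range(text_len):
--         text += alpha[i % 16]
--     pattern = ""
--     for i in range(pattern_len):
--         pattern += alpha[(i * 3 + 7) % 16]
--
--     match_count = 0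
--     comparisons = 0
--
--     for i in range(text_len - pattern_len + 1):
--         found = True
--         for j in range(pattern_len):
--             comparisons += 1
--             if text[i + j] != pattern[j]:
--                 found = False
--                 break
--         if found:
--             match_count += 1
--
--     return (match_count, comparisons)
-- ===== SOURCE B (Python) =====
-- def string_matching_count(text_len, pattern_len):
--     """Closed-form count: the periodic text/pattern structure means each window
--     mismatches within the first two comparisons unless pattern_len <= 1."""
--     windows = max(0, text_len - pattern_len + 1)
--     # windows whose start index i satisfies i % 16 == 7 (text[i] == pattern[0])
--     hits = (windows + 8) // 16
--     if pattern_len <= 0: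
--         return (windows, 0)
--     if pattern_len == 1:
--         return (hits, windows)
--     return (0, windows + hits)
-- ===== Notes on version B (the rewrite author's own statement) =====
-- stated objective: faster
-- what changed: B replaces A's generation of the text/pattern strings and the brute-force sliding-window scan by closed-form arithmetic: the period-16 structure means every window mismatches within its first two comparisons unless pattern_len <= 1, so matches and comparisons are computed from the window count and (windows+8)//16 alone.
import Mathlib
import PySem

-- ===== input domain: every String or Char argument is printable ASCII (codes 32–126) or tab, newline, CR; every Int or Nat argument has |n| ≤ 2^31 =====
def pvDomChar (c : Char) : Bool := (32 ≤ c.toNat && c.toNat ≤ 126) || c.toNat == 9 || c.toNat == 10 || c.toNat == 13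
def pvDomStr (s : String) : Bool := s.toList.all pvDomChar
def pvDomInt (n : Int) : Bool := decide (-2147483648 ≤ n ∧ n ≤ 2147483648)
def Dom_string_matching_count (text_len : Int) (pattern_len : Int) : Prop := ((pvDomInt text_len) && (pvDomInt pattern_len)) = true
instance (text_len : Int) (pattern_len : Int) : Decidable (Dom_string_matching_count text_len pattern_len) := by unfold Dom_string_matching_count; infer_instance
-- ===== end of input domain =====

-- B replaces A's O(text_len * pattern_len) simulation by O(1) closed-form arithmetic
-- exploiting the period-16 structure of the generated text and pattern (objective: faster).

-- ===== PORT A =====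
-- the repeating alphabet "abcdefghijklmnop"
def pvAlpha : List Char :=
  ['a','b','c','d','e','f','g','h','i','j','k','l','m','n','o','p']

-- text/pattern builders: 'text += alpha[i % 16]'; the index 'i % 16' (resp. '(i*3+7) % 16')
-- is always within 0..15, so Python never raises here and pyGetD with a dummy default is exact
def pvText (n : Int) : List Char :=
  (PySem.List.pyRange 0 n 1).foldl
    (fun acc i => acc ++ [PySem.List.pyGetD pvAlpha (PySem.Int.mod i 16) ' ']) []

def pvPattern (n : Int) : List Char :=
  (PySem.List.pyRange 0 n 1).foldl
    (fun acc i => acc ++ [PySem.List.pyGetD pvAlpha (PySem.Int.mod (i * 3 + 7) 16) ' ']) []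

-- inner loop 'for j in range(pattern_len): comparisons += 1; if text[i+j] != pattern[j]: found=False; break'
-- (indices always in range for the windows the outer loop visits, so pyGetD is exact)
def pvInnerA (text pattern : List Char) (i : Int) : List Int → Int → Bool × Int
  | [], comps => (true, comps)
  | j :: rest, comps =>
    let comps := comps + 1
    if PySem.List.pyGetD text (i + j) ' ' ≠ PySem.List.pyGetD pattern j ' ' then (false, comps)
    else pvInnerA text pattern i rest comps

def string_matching_count (text_len : Int) (pattern_len : Int) : List Int :=
  let text := pvText text_len
  let pattern := pvPattern pattern_len
  let res := (PySem.List.pyRange 0 (text_len - pattern_len + 1) 1).foldl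
    (fun (st : Int × Int) i =>
      let r := pvInnerA text pattern i (PySem.List.pyRange 0 pattern_len 1) st.2
      if r.1 then (st.1 + 1, r.2) else (st.1, r.2))
    (0, 0)
  [res.1, res.2]

-- ===== PORT B =====
def string_matching_count_alt (text_len : Int) (pattern_len : Int) : List Int :=
  let windows := max 0 (text_len - pattern_len + 1)
  let hits := PySem.Int.floordiv (windows + 8) 16
  if pattern_len ≤ 0 then [windows, 0]
  else if pattern_len = 1 then [hits, windows]
  else [0, windows + hits]

-- ===== PRECONDITION & SPEC =====
def Spec_string_matching_count (text_len : Int) (pattern_len : Int) (out : List Int) : Prop := out = string_matching_count_alt text_len pattern_len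
instance (text_len : Int) (pattern_len : Int) (out : List Int) : Decidable (Spec_string_matching_count text_len pattern_len out) := by unfold Spec_string_matching_count; infer_instance

-- ===== CLAIM (what is proved, stated in full; the proofs are below) =====
def Claim_equal_string_matching_count : Prop := ∀ (text_len : Int) (pattern_len : Int), Dom_string_matching_count text_len pattern_len → Spec_string_matching_count text_len pattern_len (string_matching_count text_len pattern_len)

-- ===== LEMMAS AND PROOFS =====

theorem pvText_get (n k : Int) (h0 : 0 ≤ k) (h1 : k < n) :
    PySem.List.pyGetD (pvText n) k ' ' = PySem.List.pyGetD pvAlpha (PySem.Int.mod k 16) ' ' := by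
  have hmap : pvText n
      = (PySem.List.pyRange 0 n 1).map (fun i => PySem.List.pyGetD pvAlpha (PySem.Int.mod i 16) ' ') := by
    unfold pvText
    have h2 := PySem.List.foldl_append_singleton_eq_map
      (fun i => PySem.List.pyGetD pvAlpha (PySem.Int.mod i 16) ' ') (PySem.List.pyRange 0 n 1) ([] : List Char)
    rw [List.nil_append] at h2
    exact h2
  have hlen : k < (((PySem.List.pyRange 0 n 1).map
      (fun i => PySem.List.pyGetD pvAlpha (PySem.Int.mod i 16) ' ')).length : Int) := by
    rw [List.length_map, PySem.List.length_pyRange_one]; omega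
  rw [hmap, PySem.List.pyGetD_eq_getElem _ _ h0 hlen]
  have hk : k.toNat < (PySem.List.pyRange 0 n 1).length := by
    rw [PySem.List.length_pyRange_one]; omega
  rw [List.getElem_map, PySem.List.getElem_pyRange_one 0 n k.toNat hk]
  congr 2
  omega

theorem pvPattern_get (n k : Int) (h0 : 0 ≤ k) (h1 : k < n) :
    PySem.List.pyGetD (pvPattern n) k ' ' = PySem.List.pyGetD pvAlpha (PySem.Int.mod (k * 3 + 7) 16) ' ' := by
  have hmap : pvPattern n
      = (PySem.List.pyRange 0 n 1).map (fun i => PySem.List.pyGetD pvAlpha (PySem.Int.mod (i * 3 + 7) 16) ' ') := by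
    unfold pvPattern
    have h2 := PySem.List.foldl_append_singleton_eq_map
      (fun i => PySem.List.pyGetD pvAlpha (PySem.Int.mod (i * 3 + 7) 16) ' ') (PySem.List.pyRange 0 n 1) ([] : List Char)
    rw [List.nil_append] at h2
    exact h2
  have hlen : k < (((PySem.List.pyRange 0 n 1).map
      (fun i => PySem.List.pyGetD pvAlpha (PySem.Int.mod (i * 3 + 7) 16) ' ')).length : Int) := by
    rw [List.length_map, PySem.List.length_pyRange_one]; omega
  rw [hmap, PySem.List.pyGetD_eq_getElem _ _ h0 hlen]
  have hk : k.toNat < (PySem.List.pyRange 0 n 1).length := by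
    rw [PySem.List.length_pyRange_one]; omega
  rw [List.getElem_map, PySem.List.getElem_pyRange_one 0 n k.toNat hk]
  congr 2
  omega

-- the generated text character at index k equals 'h' (= pattern[0]) iff k % 16 = 7
theorem pvAlpha_eq_h (m : Int) (h0 : 0 ≤ m) (h1 : m < 16) :
    (PySem.List.pyGetD pvAlpha m ' ' = 'h') ↔ m = 7 := by
  interval_cases m <;> simp [pvAlpha, PySem.List.pyGetD, PySem.List.pyGet?, PySem.List.pyIdx?]

-- inner loop, empty pattern: no comparisons, found
theorem pvInnerA_le0 (t p : List Char) (i pl : Int) (h : pl ≤ 0) : ∀ comps,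
    pvInnerA t p i (PySem.List.pyRange 0 pl 1) comps = (true, comps) := by
  intro comps
  rw [PySem.List.pyRange_one_eq_nil h]
  rfl

-- inner loop, pattern_len = 1: one comparison, match iff i % 16 = 7
theorem pvInnerA_eq1 (tl i : Int) (h0 : 0 ≤ i) (h1 : i + 1 ≤ tl) : ∀ comps,
    pvInnerA (pvText tl) (pvPattern 1) i (PySem.List.pyRange 0 1 1) comps
      = (decide (i % 16 = 7), comps + 1) := by
  intro comps
  have hmod : PySem.Int.mod i 16 = i % 16 := PySem.Int.mod_eq_emod_of_pos (by norm_num)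
  have hb0 : 0 ≤ i % 16 := Int.emod_nonneg i (by norm_num)
  have hb1 : i % 16 < 16 := Int.emod_lt_of_pos i (by norm_num)
  rw [PySem.List.pyRange_one_cons (by norm_num : (0:Int) < 1),
      show (0:Int) + 1 = 1 by norm_num, PySem.List.pyRange_one_eq_nil (le_refl 1)]
  simp only [pvInnerA]
  rw [show i + 0 = i by ring, pvText_get tl i h0 (by omega),
      pvPattern_get 1 0 (le_refl 0) one_pos, hmod,
      show PySem.Int.mod (0 * 3 + 7) 16 = 7 by decide,
      show PySem.List.pyGetD pvAlpha 7 ' ' = 'h' by decide]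
  by_cases h7 : i % 16 = 7
  · rw [if_neg (by simp [(pvAlpha_eq_h _ hb0 hb1).mpr h7])]
    simp [h7]
  · rw [if_pos (fun hc => h7 ((pvAlpha_eq_h _ hb0 hb1).mp hc))]
    simp [h7]

-- inner loop, pattern_len ≥ 2: mismatch within the first two comparisons
theorem pvInnerA_ge2 (tl pl i : Int) (hpl : 2 ≤ pl) (h0 : 0 ≤ i) (h1 : i + pl ≤ tl) : ∀ comps,
    pvInnerA (pvText tl) (pvPattern pl) i (PySem.List.pyRange 0 pl 1) comps
      = (false, comps + (if i % 16 = 7 then 2 else 1)) := by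
  intro comps
  have hmod : PySem.Int.mod i 16 = i % 16 := PySem.Int.mod_eq_emod_of_pos (by norm_num)
  have hb0 : 0 ≤ i % 16 := Int.emod_nonneg i (by norm_num)
  have hb1 : i % 16 < 16 := Int.emod_lt_of_pos i (by norm_num)
  rw [PySem.List.pyRange_one_cons (by omega : (0:Int) < pl),
      show (0:Int) + 1 = 1 by norm_num]
  simp only [pvInnerA]
  rw [show i + 0 = i by ring, pvText_get tl i h0 (by omega),
      pvPattern_get pl 0 (le_refl 0) (by omega), hmod,
      show PySem.Int.mod (0 * 3 + 7) 16 = 7 by decide,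
      show PySem.List.pyGetD pvAlpha 7 ' ' = 'h' by decide]
  by_cases h7 : i % 16 = 7
  · rw [if_neg (by simp [(pvAlpha_eq_h _ hb0 hb1).mpr h7])]
    rw [PySem.List.pyRange_one_cons (by omega : (1:Int) < pl)]
    simp only [pvInnerA]
    rw [pvText_get tl (i + 1) (by omega) (by omega),
        pvPattern_get pl 1 (by norm_num) (by omega),
        show PySem.Int.mod (1 * 3 + 7) 16 = 10 by decide,
        show PySem.Int.mod (i + 1) 16 = 8 by
          rw [PySem.Int.mod_eq_emod_of_pos (by norm_num : (0:Int) < 16)]; omega,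
        if_pos (by decide : PySem.List.pyGetD pvAlpha 8 ' ' ≠ PySem.List.pyGetD pvAlpha 10 ' '),
        if_pos h7]
    rw [Prod.mk.injEq]
    exact ⟨rfl, by ring⟩
  · rw [if_pos (fun hc => h7 ((pvAlpha_eq_h _ hb0 hb1).mp hc)), if_neg h7]

-- outer fold closed forms, by induction on the number of windows
theorem pv_outer_le0 (tl pl : Int) (hpl : pl ≤ 0) (n : Nat) :
    (PySem.List.pyRange 0 (n : Int) 1).foldl
      (fun (st : Int × Int) i =>
        let r := pvInnerA (pvText tl) (pvPattern pl) i (PySem.List.pyRange 0 pl 1) st.2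
        if r.1 then (st.1 + 1, r.2) else (st.1, r.2))
      (0, 0) = ((n : Int), 0) := by
  induction n with
  | zero =>
    rw [Nat.cast_zero, PySem.List.pyRange_one_eq_nil (le_refl 0)]
    rfl
  | succ m ih =>
    rw [show ((m + 1 : Nat) : Int) = (m : Int) + 1 by push_cast; ring,
        PySem.List.pyRange_one_succ_right (by positivity), List.foldl_append, ih]
    simp only [List.foldl_cons, List.foldl_nil, pvInnerA_le0 _ _ _ _ hpl]
    norm_num

theorem pv_outer_eq1 (tl : Int) (n : Nat) (hn : (n : Int) ≤ tl) :
    (PySem.List.pyRange 0 (n : Int) 1).foldl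
      (fun (st : Int × Int) i =>
        let r := pvInnerA (pvText tl) (pvPattern 1) i (PySem.List.pyRange 0 1 1) st.2
        if r.1 then (st.1 + 1, r.2) else (st.1, r.2))
      (0, 0) = (((n : Int) + 8) / 16, (n : Int)) := by
  induction n with
  | zero =>
    rw [Nat.cast_zero, PySem.List.pyRange_one_eq_nil (le_refl 0)]
    norm_num
  | succ m ih =>
    have hm : (m : Int) ≤ tl := by push_cast at hn ⊢; omega
    rw [show ((m + 1 : Nat) : Int) = (m : Int) + 1 by push_cast; ring,
        PySem.List.pyRange_one_succ_right (by positivity), List.foldl_append, ih hm]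
    simp only [List.foldl_cons, List.foldl_nil,
      pvInnerA_eq1 tl (m : Int) (by positivity) (by omega)]
    by_cases h7 : (m : Int) % 16 = 7
    · simp only [h7, decide_true, if_true]
      rw [Prod.mk.injEq]
      omega
    · simp only [h7, decide_false, Bool.false_eq_true, if_false]
      rw [Prod.mk.injEq]
      omega

theorem pv_outer_ge2 (tl pl : Int) (hpl : 2 ≤ pl) (n : Nat) (hn : (n : Int) ≤ tl - pl + 1) :
    (PySem.List.pyRange 0 (n : Int) 1).foldl
      (fun (st : Int × Int) i =>
        let r := pvInnerA (pvText tl) (pvPattern pl) i (PySem.List.pyRange 0 pl 1) st.2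
        if r.1 then (st.1 + 1, r.2) else (st.1, r.2))
      (0, 0) = (0, (n : Int) + ((n : Int) + 8) / 16) := by
  induction n with
  | zero =>
    rw [Nat.cast_zero, PySem.List.pyRange_one_eq_nil (le_refl 0)]
    norm_num
  | succ m ih =>
    have hm : (m : Int) ≤ tl - pl + 1 := by push_cast at hn ⊢; omega
    rw [show ((m + 1 : Nat) : Int) = (m : Int) + 1 by push_cast; ring,
        PySem.List.pyRange_one_succ_right (by positivity), List.foldl_append, ih hm]
    simp only [List.foldl_cons, List.foldl_nil,
      pvInnerA_ge2 tl pl (m : Int) hpl (by positivity) (by omega)]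
    simp only [Bool.false_eq_true, if_false]
    by_cases h7 : (m : Int) % 16 = 7
    · rw [if_pos h7, Prod.mk.injEq]
      omega
    · rw [if_neg h7, Prod.mk.injEq]
      omega

-- ===== VERDICT (by name: the statement is the Claim_ definition above) =====
theorem string_matching_count_spec : Claim_equal_string_matching_count := by
  intro tl pl _
  show _ = _
  simp only [string_matching_count, string_matching_count_alt]
  by_cases hWpos : tl - pl + 1 ≤ 0
  · rw [PySem.List.pyRange_one_eq_nil hWpos,
        show max (0:Int) (tl - pl + 1) = 0 by omega]
    split_ifs <;> rfl
  · push_cast at hWpos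
    have hmax : max (0:Int) (tl - pl + 1) = tl - pl + 1 := by omega
    have hdiv : PySem.Int.floordiv (tl - pl + 1 + 8) 16 = (tl - pl + 1 + 8) / 16 :=
      PySem.Int.floordiv_eq_ediv_of_pos (by norm_num)
    obtain ⟨n, hn⟩ : ∃ n : Nat, (n : Int) = tl - pl + 1 := ⟨(tl - pl + 1).toNat, by omega⟩
    rw [hmax, hdiv, ← hn]
    by_cases hle : pl ≤ 0
    · rw [pv_outer_le0 tl pl hle n, if_pos hle]
    · by_cases h1 : pl = 1
      · rw [h1] at hn ⊢
        rw [pv_outer_eq1 tl n (by omega), if_neg (by omega), if_pos rfl]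
      · rw [pv_outer_ge2 tl pl (by omega) n (by omega),
            if_neg hle, if_neg h1]
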